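-- pv_equiv track=rewrite | github.com/nikJ13/AoC-2023 | 15a.py | calculateVal
-- ===== SOURCE A (Python) =====
-- def calculateVal(string):
--     val = 0
--     for ch in string:
--         temp = ord(ch)
--         val += temp
--         val *= 17
--         val = val % 256
--     return val
-- ===== SOURCE B (Python) =====
-- def calculateVal(string):
--     # position-weighted sum: val = (sum ord(ch)*17^(k+1)) % 256 with k = distance from end;
--     # the weight is kept reduced mod 256, the total is reduced once at the end
--     total = 0
--     power = 17
--     for ch in reversed(string):
--         total += ord(ch) * power
--         power = power * 17 % 256
--     return total % 256
-- ===== Notes on version B (the rewrite author's own statement) =====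
-- stated objective: alternative
-- what changed: Replaces A's per-character clamped state (val = ((val+ord)*17) % 256 each step) by a back-to-front position-weighted sum: total += ord(ch)*power with a running mod-256 power of 17, taking % 256 on the total exactly once at the end.
import Mathlib
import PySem

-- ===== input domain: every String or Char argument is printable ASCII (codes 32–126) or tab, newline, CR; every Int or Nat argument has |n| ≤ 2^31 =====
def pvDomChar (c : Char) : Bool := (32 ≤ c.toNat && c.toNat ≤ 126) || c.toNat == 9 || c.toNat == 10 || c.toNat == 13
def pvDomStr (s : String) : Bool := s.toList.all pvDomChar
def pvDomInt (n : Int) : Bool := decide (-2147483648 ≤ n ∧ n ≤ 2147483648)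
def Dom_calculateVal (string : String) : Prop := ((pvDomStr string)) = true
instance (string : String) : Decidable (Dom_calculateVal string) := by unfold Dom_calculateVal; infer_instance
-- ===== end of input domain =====

-- B replaces A's per-character clamped state (val ← ((val+ord)*17) % 256) by a reversed
-- traversal accumulating a position-weighted sum ord(ch)*17^k, taking % 256 once at the end.

-- ===== PORT A =====
def calculateVal (string : String) : Int :=
  string.toList.foldl
    (fun val ch => PySem.Int.mod ((val + (ch.toNat : Int)) * 17) 256) 0

-- ===== PORT B =====
def calculateVal_alt (string : String) : Int :=
  let p := string.toList.reverse.foldl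
    (fun (st : Int × Int) ch => (st.1 + (ch.toNat : Int) * st.2, PySem.Int.mod (st.2 * 17) 256)) (0, 17)
  PySem.Int.mod p.1 256

-- ===== PRECONDITION & SPEC =====
def Spec_calculateVal (string : String) (out : Int) : Prop := out = calculateVal_alt string
instance (string : String) (out : Int) : Decidable (Spec_calculateVal string out) := by unfold Spec_calculateVal; infer_instance

-- ===== CLAIM (what is proved, stated in full; the proofs are below) =====
def Claim_equal_calculateVal : Prop := ∀ (string : String), Dom_calculateVal string → Spec_calculateVal string (calculateVal string)

-- ===== LEMMAS AND PROOFS =====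

-- the un-clamped accumulator: A's recurrence without the per-step mod
def pvAcc (l : List Char) (v : Int) : Int :=
  l.foldl (fun val ch => (val + (ch.toNat : Int)) * 17) v

-- B's folded state as foldr; pvStep keeps the weight reduced mod 256, pvStepU is unreduced
def pvStep (ch : Char) (st : Int × Int) : Int × Int :=
  (st.1 + (ch.toNat : Int) * st.2, PySem.Int.mod (st.2 * 17) 256)

def pvStepU (ch : Char) (st : Int × Int) : Int × Int :=
  (st.1 + (ch.toNat : Int) * st.2, st.2 * 17)

theorem pvB_foldr (l : List Char) :
    l.reverse.foldl (fun (st : Int × Int) ch => (st.1 + (ch.toNat : Int) * st.2, PySem.Int.mod (st.2 * 17) 256)) (0, 17)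
      = l.foldr pvStep (0, 17) := by
  rw [List.foldl_reverse]; rfl

theorem pvSnd_foldrU (l : List Char) : (l.foldr pvStepU (0, 17)).2 = 17 ^ (l.length + 1) := by
  induction l with
  | nil => rfl
  | cons c l ih => simp [pvStepU, ih]; ring

-- the reduced fold agrees with the unreduced one modulo 256
theorem pvFoldr_mod (l : List Char) :
    (l.foldr pvStep (0, 17)).1 % 256 = (l.foldr pvStepU (0, 17)).1 % 256
      ∧ (l.foldr pvStep (0, 17)).2 = (l.foldr pvStepU (0, 17)).2 % 256 := by
  induction l with
  | nil => exact ⟨rfl, rfl⟩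
  | cons c l ih =>
    obtain ⟨h1, h2⟩ := ih
    simp only [List.foldr_cons, pvStep, pvStepU,
      PySem.Int.mod_eq_emod_of_pos (by norm_num : (0:Int) < 256)]
    constructor
    · rw [Int.add_emod, Int.mul_emod, h2, Int.emod_emod_of_dvd _ (dvd_refl (256:Int)),
        ← Int.mul_emod, h1, ← Int.add_emod]
    · rw [Int.mul_emod, h2, Int.emod_emod_of_dvd _ (by norm_num : (256:Int) ∣ 256), ← Int.mul_emod]

theorem pvAcc_eq (l : List Char) (v : Int) :
    pvAcc l v = v * 17 ^ l.length + (l.foldr pvStepU (0, 17)).1 := by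
  induction l generalizing v with
  | nil => simp [pvAcc]
  | cons c l ih =>
    simp only [pvAcc, List.foldl_cons, List.foldr_cons] at *
    rw [ih, pvStepU, pvSnd_foldrU]
    simp [pow_succ]; ring

theorem pvMod_step (v c : Int) :
    PySem.Int.mod ((PySem.Int.mod v 256 + c) * 17) 256 = PySem.Int.mod ((v + c) * 17) 256 := by
  simp only [PySem.Int.mod_eq_emod_of_pos (by norm_num : (0:Int) < 256)]
  conv_rhs => rw [Int.mul_emod, Int.add_emod]
  rw [Int.mul_emod, Int.add_emod (v % 256), Int.emod_emod_of_dvd _ (by norm_num : (256:Int) ∣ 256)]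

theorem pvA_eq_mod (l : List Char) (v : Int) :
    l.foldl (fun val ch => PySem.Int.mod ((val + (ch.toNat : Int)) * 17) 256) (PySem.Int.mod v 256)
      = PySem.Int.mod (pvAcc l v) 256 := by
  induction l generalizing v with
  | nil => simp [pvAcc]
  | cons c l ih =>
    simp only [List.foldl_cons, pvAcc, List.foldl_cons] at *
    rw [pvMod_step, ih]

-- ===== VERDICT (by name: the statement is the Claim_ definition above) =====
theorem calculateVal_spec : Claim_equal_calculateVal := by
  intro s _
  unfold Spec_calculateVal calculateVal calculateVal_alt
  rw [pvB_foldr]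
  have h0 : (0 : Int) = PySem.Int.mod 0 256 := by
    rw [PySem.Int.mod_eq_emod_of_pos (by norm_num : (0:Int) < 256)]; simp
  conv_lhs => rw [h0]
  rw [pvA_eq_mod, pvAcc_eq]
  simp only [PySem.Int.mod_eq_emod_of_pos (by norm_num : (0:Int) < 256)]
  rw [(pvFoldr_mod _).1]
  simp
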